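-- pv_equiv track=rewrite | github.com/msudhanshu10/Competitive_Coding_ | problem-A-CDF-653.py | maxmod
-- ===== SOURCE A (Python) =====
-- def maxmod(x,y,n):
--     i=n
--     k=0
--     while i>=0:
--         if i%x==y:
--             k=i
--             break
--         i=i-1
--     return k
-- ===== SOURCE B (Python) =====
-- def maxmod(x, y, n):
--     # closed form: largest i in [0, n] with i % x == y, else 0
--     if n < 0 or y % x != y:
--         return 0
--     i = n - (n - y) % abs(x)
--     return i if i >= 0 else 0
-- ===== Notes on version B (the rewrite author's own statement) =====
-- stated objective: faster
-- what changed: Replaced the O(n) downward scan for the largest i<=n with i%x==y by an O(1) closed form n - (n-y) % abs(x) guarded by the residue-validity test y%x==y.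
import Mathlib
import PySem

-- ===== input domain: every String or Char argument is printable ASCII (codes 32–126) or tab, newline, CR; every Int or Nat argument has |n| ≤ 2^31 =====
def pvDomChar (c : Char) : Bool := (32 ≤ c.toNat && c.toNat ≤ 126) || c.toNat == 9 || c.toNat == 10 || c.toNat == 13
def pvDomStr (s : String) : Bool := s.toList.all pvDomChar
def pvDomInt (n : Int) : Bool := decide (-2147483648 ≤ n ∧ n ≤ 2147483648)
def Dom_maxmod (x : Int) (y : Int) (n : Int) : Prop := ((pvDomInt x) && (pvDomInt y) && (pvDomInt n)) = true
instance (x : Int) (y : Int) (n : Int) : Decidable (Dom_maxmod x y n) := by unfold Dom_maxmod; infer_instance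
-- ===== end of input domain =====

-- B replaces A's linear downward scan by a constant-time closed form.

-- ===== PORT A =====
-- A's while loop: i counts down from n; 'k=i; break' is returning i, falling off the loop returns k = 0.
def maxmodGo (x y : Int) (i : Int) : Int :=
  if _h : 0 ≤ i then
    if PySem.Int.mod i x = y then i else maxmodGo x y (i - 1)
  else 0
termination_by (i + 1).toNat
decreasing_by omega

def maxmod (x : Int) (y : Int) (n : Int) : Int := maxmodGo x y n

-- ===== PORT B =====
def maxmod_alt (x : Int) (y : Int) (n : Int) : Int :=
  if n < 0 ∨ PySem.Int.mod y x ≠ y then 0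
  else
    let i := n - PySem.Int.mod (n - y) |x|
    if 0 ≤ i then i else 0

-- ===== PRECONDITION & SPEC =====
-- Pre_ excludes exactly the inputs where A raises ZeroDivisionError: x = 0 with n ≥ 0 (B raises there too).
def Pre_maxmod (x : Int) (y : Int) (n : Int) : Prop := x ≠ 0 ∨ n < 0
instance (x : Int) (y : Int) (n : Int) : Decidable (Pre_maxmod x y n) := by unfold Pre_maxmod; infer_instance
def pvWitness_maxmod : Int × Int × Int := (5, 2, 20)

def Spec_maxmod (x : Int) (y : Int) (n : Int) (out : Int) : Prop := out = maxmod_alt x y n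
instance (x : Int) (y : Int) (n : Int) (out : Int) : Decidable (Spec_maxmod x y n out) := by unfold Spec_maxmod; infer_instance

-- ===== CLAIM (what is proved, stated in full; the proofs are below) =====
def Claim_equal_maxmod : Prop := ∀ (x : Int) (y : Int) (n : Int), Dom_maxmod x y n → Pre_maxmod x y n → Spec_maxmod x y n (maxmod x y n)

-- ===== LEMMAS AND PROOFS =====

-- x divides a - (a % x) (Python mod).
theorem mod_sub_dvd (x a : Int) : x ∣ (a - PySem.Int.mod a x) := by
  have h := PySem.Int.floordiv_mul_add_mod a x
  exact ⟨PySem.Int.floordiv a x, by linarith⟩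

-- Python mod is the unique r in the divisor-sign window congruent to a.
theorem mod_char (x a r : Int) (hx : x ≠ 0)
    (h1 : 0 < x → 0 ≤ r ∧ r < x) (h2 : x < 0 → x < r ∧ r ≤ 0)
    (hc : x ∣ (a - r)) : PySem.Int.mod a x = r := by
  have hd : x ∣ (PySem.Int.mod a x - r) := by
    have := mod_sub_dvd x a
    have : x ∣ ((a - r) - (a - PySem.Int.mod a x)) := dvd_sub hc this
    simpa using this
  have habs : |x| ∣ (PySem.Int.mod a x - r) := (abs_dvd _ _).mpr hd
  have hz : PySem.Int.mod a x - r = 0 := by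
    apply Int.eq_zero_of_abs_lt_dvd habs
    rcases lt_or_gt_of_ne hx with hneg | hpos
    · have hb := PySem.Int.mod_neg_bounds a hneg
      have := h2 hneg
      rw [abs_of_neg hneg] at *
      rw [abs_lt]; omega
    · have hb1 := PySem.Int.mod_nonneg a hpos
      have hb2 := PySem.Int.mod_lt a hpos
      have := h1 hpos
      rw [abs_of_pos hpos] at *
      rw [abs_lt]; omega
  omega

-- mod a x itself satisfies the window.
theorem mod_window (x a : Int) (_hx : x ≠ 0) :
    (0 < x → 0 ≤ PySem.Int.mod a x ∧ PySem.Int.mod a x < x) ∧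
    (x < 0 → x < PySem.Int.mod a x ∧ PySem.Int.mod a x ≤ 0) := by
  constructor
  · intro h; exact ⟨PySem.Int.mod_nonneg a h, PySem.Int.mod_lt a h⟩
  · intro h; exact PySem.Int.mod_neg_bounds a h

-- A's loop from i computes exactly B's closed form at i.
theorem maxmodGo_eq (x y : Int) (hx : x ≠ 0) : ∀ i : Int,
    maxmodGo x y i =
      if 0 ≤ i ∧ PySem.Int.mod y x = y ∧ 0 ≤ i - PySem.Int.mod (i - y) |x| then
        i - PySem.Int.mod (i - y) |x|
      else 0 := by
  intro i
  have hm : (0:Int) < |x| := abs_pos.mpr hx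
  induction i using maxmodGo.induct x y with
  | case1 i hi hc =>
    -- loop hits: mod i x = y, loop returns i
    rw [maxmodGo, dif_pos hi, if_pos hc]
    have hyy : PySem.Int.mod y x = y := by
      apply mod_char x y y hx
      · intro h; have := (mod_window x i hx).1 h; rw [hc] at this; exact this
      · intro h; have := (mod_window x i hx).2 h; rw [hc] at this; exact this
      · simp
    have hdvd : |x| ∣ (i - y) := by
      rw [← hc]; exact (abs_dvd _ _).mpr (mod_sub_dvd x i)
    have he : PySem.Int.mod (i - y) |x| = 0 :=
      (PySem.Int.mod_eq_zero_iff_dvd _ _).mpr hdvd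
    rw [he, if_pos ⟨hi, hyy, by omega⟩]; omega
  | case2 i hi hc ih =>
    -- loop misses: recurse on i - 1
    rw [maxmodGo, dif_pos hi, if_neg hc, ih]
    by_cases hy : PySem.Int.mod y x = y
    · have heb1 : 0 ≤ PySem.Int.mod (i - y) |x| := PySem.Int.mod_nonneg _ hm
      have heb2 : PySem.Int.mod (i - y) |x| < |x| := PySem.Int.mod_lt _ hm
      have hene : PySem.Int.mod (i - y) |x| ≠ 0 := by
        intro h0
        have hdvd : |x| ∣ (i - y) := (PySem.Int.mod_eq_zero_iff_dvd _ _).mp h0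
        have : PySem.Int.mod i x = y := by
          apply mod_char x i y hx
          · intro h; have := (mod_window x y hx).1 h; rw [hy] at this; exact this
          · intro h; have := (mod_window x y hx).2 h; rw [hy] at this; exact this
          · exact (abs_dvd _ _).mp hdvd
        exact hc this
      have he' : PySem.Int.mod (i - 1 - y) |x| = PySem.Int.mod (i - y) |x| - 1 := by
        apply mod_char |x| (i - 1 - y) (PySem.Int.mod (i - y) |x| - 1) (by omega)
        · intro _; constructor <;> omega
        · intro h; omega
        · obtain ⟨q, hq⟩ := mod_sub_dvd |x| (i - y)
          exact ⟨q, by omega⟩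
      rw [he']
      split_ifs with h1 h2 <;> omega
    · rw [if_neg (by simp [hy]), if_neg (by simp [hy])]
  | case3 i hi =>
    rw [maxmodGo, dif_neg hi, if_neg (fun hC => hi hC.1)]

-- ===== VERDICT (by name: the statement is the Claim_ definition above) =====
theorem maxmod_spec : Claim_equal_maxmod := by
  intro x y n _hdom hpre
  unfold Spec_maxmod maxmod maxmod_alt
  by_cases hx : x = 0
  · -- Pre_ forces n < 0: both sides are 0
    have hn : n < 0 := hpre.resolve_left (not_not.mpr hx)
    rw [maxmodGo, dif_neg (show ¬ (0:Int) ≤ n by omega), if_pos (Or.inl hn)]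
  · rw [maxmodGo_eq x y hx n]
    by_cases hcond : n < 0 ∨ PySem.Int.mod y x ≠ y
    · rw [if_pos hcond, if_neg]
      rcases hcond with h | h
      · exact fun hC => absurd hC.1 (by omega)
      · exact fun hC => h hC.2.1
    · rw [if_neg hcond]
      rw [not_or, not_lt, ne_eq, not_not] at hcond
      obtain ⟨hn, hy⟩ := hcond
      show _ = if 0 ≤ n - PySem.Int.mod (n - y) |x| then n - PySem.Int.mod (n - y) |x| else 0
      by_cases hv : 0 ≤ n - PySem.Int.mod (n - y) |x|
      · rw [if_pos ⟨hn, hy, hv⟩, if_pos hv]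
      · rw [if_neg (fun hC => hv hC.2.2), if_neg hv]
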